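-- pv_equiv track=rewrite | github.com/mateozorzi/TDA | Resueltos/2024-c2-3/ej1.py | balanceada
-- ===== SOURCE A (Python) =====
-- def balanceada(cadena):
--
--     par_izq = 0
--     par_der = 0
--
--     largo = 0
--
--     for c in cadena:
--         if c == '(':
--             par_izq += 1
--         elif c == ')':
--             par_der += 1
--
--         if par_der > par_izq:
--             break
--
--         largo += 1
--
--     return largo
-- ===== SOURCE B (Python) =====
-- def balanceada(cadena):
--     # build the running balance (prefix sums of +1/-1/0 deltas), then search it
--     sums = []
--     bal = 0
--     for c in cadena:
--         bal += (c == '(') - (c == ')')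
--         sums.append(bal)
--     return next((i for i, s in enumerate(sums) if s < 0), len(cadena))
-- ===== Notes on version B (the rewrite author's own statement) =====
-- stated objective: alternative
-- what changed: B first builds the running-balance prefix-sum sequence and then searches it for the first negative entry (defaulting to len), instead of A's fused loop with two counters and a break.
import Mathlib
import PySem

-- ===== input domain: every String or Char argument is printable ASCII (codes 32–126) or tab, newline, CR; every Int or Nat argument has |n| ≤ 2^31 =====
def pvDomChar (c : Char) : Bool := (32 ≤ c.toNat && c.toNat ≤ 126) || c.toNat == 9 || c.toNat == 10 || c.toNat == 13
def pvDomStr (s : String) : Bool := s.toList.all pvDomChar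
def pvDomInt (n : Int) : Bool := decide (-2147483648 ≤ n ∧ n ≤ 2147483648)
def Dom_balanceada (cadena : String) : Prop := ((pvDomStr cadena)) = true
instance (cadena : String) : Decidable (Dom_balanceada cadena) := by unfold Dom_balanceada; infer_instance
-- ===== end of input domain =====

-- B builds the running-balance prefix-sum sequence and then searches it for the first
-- negative entry, instead of A's fused loop with two counters and a break (alternative decomposition).


-- ===== PORT A =====
-- A's loop: two counters, break when par_der > par_izq, largo counts surviving chars
def balanceadaLoop : List Char → Int → Int → Int → Int
  | [], _, _, largo => largo
  | c :: rest, parIzq, parDer, largo =>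
    let parIzq := if c = '(' then parIzq + 1 else parIzq
    let parDer := if c ≠ '(' ∧ c = ')' then parDer + 1 else parDer
    if parDer > parIzq then largo else balanceadaLoop rest parIzq parDer (largo + 1)

def balanceada (cadena : String) : Int :=
  balanceadaLoop cadena.toList 0 0 0

-- ===== PORT B =====
-- B's first pass: the list of running balances (prefix sums of the +1/-1/0 deltas)
def balSums : List Char → Int → List Int
  | [], _ => []
  | c :: rest, bal =>
    let bal := bal + ((if c = '(' then 1 else 0) - (if c = ')' then 1 else 0))
    bal :: balSums rest bal

-- B's second pass: first index with a negative running balance, default len(cadena)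
def balanceada_alt (cadena : String) : Int :=
  match (balSums cadena.toList 0).findIdx? (fun s => s < 0) with
  | some i => (i : Int)
  | none => PySem.Str.len cadena

-- ===== PRECONDITION & SPEC =====
def Spec_balanceada (cadena : String) (out : Int) : Prop := out = balanceada_alt cadena
instance (cadena : String) (out : Int) : Decidable (Spec_balanceada cadena out) := by unfold Spec_balanceada; infer_instance

-- ===== CLAIM (what is proved, stated in full; the proofs are below) =====
def Claim_equal_balanceada : Prop := ∀ (cadena : String), Dom_balanceada cadena → Spec_balanceada cadena (balanceada cadena)

-- ===== LEMMAS AND PROOFS =====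
def firstNeg (sums : List Int) (len : Int) : Int :=
  match sums.findIdx? (fun s => s < 0) with
  | some i => (i : Int)
  | none => len

theorem balanceadaLoop_eq (l : List Char) (parIzq parDer largo bal : Int)
    (h : bal = parIzq - parDer) :
    balanceadaLoop l parIzq parDer largo = largo + firstNeg (balSums l bal) l.length := by
  induction l generalizing parIzq parDer largo bal with
  | nil => simp [balanceadaLoop, balSums, firstNeg, List.findIdx?, List.findIdx?.go]
  | cons c rest ih =>
    by_cases hlt : bal + ((if c = '(' then 1 else 0) - (if c = ')' then 1 else 0)) < 0
    · have : balanceadaLoop (c :: rest) parIzq parDer largo = largo := by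
        simp only [balanceadaLoop]
        split_ifs with h1 h2 <;> simp_all <;> omega
      rw [this]
      simp [balSums, firstNeg, List.findIdx?_cons, hlt]
    · have hstep : balanceadaLoop (c :: rest) parIzq parDer largo =
        balanceadaLoop rest (if c = '(' then parIzq + 1 else parIzq)
          (if c ≠ '(' ∧ c = ')' then parDer + 1 else parDer) (largo + 1) := by
        simp only [balanceadaLoop]
        split_ifs with h1 h2 <;> simp_all <;> omega
      rw [hstep, ih _ _ _ (bal + ((if c = '(' then 1 else 0) - (if c = ')' then 1 else 0)))
        (by split_ifs with h1 h2 <;> simp_all <;> omega)]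
      simp only [balSums, firstNeg, List.findIdx?_cons]
      have : ¬ (bal + ((if c = '(' then 1 else 0) - (if c = ')' then 1 else 0)) < 0) := hlt
      simp only [this, decide_false]
      cases hfi : (balSums rest (bal + ((if c = '(' then 1 else 0) - (if c = ')' then 1 else 0)))).findIdx?
          (fun s => decide (s < 0)) with
      | none => simp [List.length_cons]; ring
      | some i => simp [Option.map_some]; ring

-- ===== VERDICT (by name: the statement is the Claim_ definition above) =====
theorem balanceada_spec : Claim_equal_balanceada := by
  intro cadena _
  unfold Spec_balanceada balanceada balanceada_alt
  rw [balanceadaLoop_eq cadena.toList 0 0 0 0 (by omega)]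
  unfold firstNeg
  cases h : (balSums cadena.toList 0).findIdx? (fun s => s < 0) <;>
    simp [PySem.Str.len_eq]
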